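-- pv_equiv track=rewrite | github.com/Yidien/hiveCreateTableTool | node.py | split_comma
-- ===== SOURCE A (Python) =====
-- def split_comma(text):
--     count = 0
--     start = -1
--     ret_list = []
--     for index, char in enumerate(text):
--         if char == ',' and count == 0:
--             ret_list.append(text[start+1:index])
--             start = index
--         if char == '(':
--             count += 1
--         if char == ')':
--             count -= 1
--     ret_list.append(text[start+1:])
--     return ret_list
-- ===== SOURCE B (Python) =====
-- def split_comma(text):
--     result = []
--     current = ''
--     depth = 0
--     for ch in text:
--         if ch == ',' and depth == 0:
--             result.append(current)
--             current = ''
--         else: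
--             if ch == '(':
--                 depth += 1
--             elif ch == ')':
--                 depth -= 1
--             current += ch
--     result.append(current)
--     return result
-- ===== Notes on version B (the rewrite author's own statement) =====
-- stated objective: simpler
-- what changed: Replaces A's enumerate/index/slice bookkeeping (a start index and text[start+1:index] slices) with a direct single pass that accumulates each segment in a string buffer, appending it on each top-level comma; no index arithmetic or slicing remains.
import Mathlib
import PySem

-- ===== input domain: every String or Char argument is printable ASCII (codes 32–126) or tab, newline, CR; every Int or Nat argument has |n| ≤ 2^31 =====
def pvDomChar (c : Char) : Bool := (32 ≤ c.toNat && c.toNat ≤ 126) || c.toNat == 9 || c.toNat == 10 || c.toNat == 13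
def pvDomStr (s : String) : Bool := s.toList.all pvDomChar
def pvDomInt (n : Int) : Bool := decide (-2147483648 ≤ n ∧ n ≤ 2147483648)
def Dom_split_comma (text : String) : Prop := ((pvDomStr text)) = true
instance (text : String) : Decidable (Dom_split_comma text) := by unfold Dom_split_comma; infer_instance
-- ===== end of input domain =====

-- B replaces A's index/slice bookkeeping with a plain buffer-accumulating pass (simpler decomposition, same O(n) cost).

-- ===== PORT A =====
-- A's loop body: on a top-level comma append text[start+1:index] and move start; then adjust count on parens.
def splitCommaStepA (cs : List Char) (st : Int × Int × List String) (p : Int × Char) :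
    Int × Int × List String :=
  let count := st.1
  let start := st.2.1
  let ret := st.2.2
  let index := p.1
  let char := p.2
  let (start, ret) :=
    if char = ',' ∧ count = 0 then
      (index, ret ++ [String.ofList (PySem.List.slice cs (some (start + 1)) (some index))])
    else (start, ret)
  let count := if char = '(' then count + 1 else count
  let count := if char = ')' then count - 1 else count
  (count, start, ret)

def split_comma (text : String) : List String :=
  let cs := text.toList
  let st := (PySem.List.enumerate cs 0).foldl (splitCommaStepA cs) (0, -1, [])
  st.2.2 ++ [String.ofList (PySem.List.slice cs (some (st.2.1 + 1)) none)]

-- ===== PORT B =====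
-- B's loop body: flush the buffer on a top-level comma, otherwise adjust depth and push the char.
def splitCommaStepB (st : List String × String × Int) (c : Char) : List String × String × Int :=
  let result := st.1
  let current := st.2.1
  let depth := st.2.2
  if c = ',' ∧ depth = 0 then (result ++ [current], "", depth)
  else
    let depth := if c = '(' then depth + 1 else if c = ')' then depth - 1 else depth
    (result, current.push c, depth)

def split_comma_alt (text : String) : List String :=
  let st := text.toList.foldl splitCommaStepB ([], "", 0)
  st.1 ++ [st.2.1]

-- ===== PRECONDITION & SPEC =====
def Spec_split_comma (text : String) (out : List String) : Prop := out = split_comma_alt text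
instance (text : String) (out : List String) : Decidable (Spec_split_comma text out) := by unfold Spec_split_comma; infer_instance

-- ===== CLAIM (what is proved, stated in full; the proofs are below) =====
def Claim_equal_split_comma : Prop := ∀ (text : String), Dom_split_comma text → Spec_split_comma text (split_comma text)

-- ===== LEMMAS AND PROOFS =====

-- Extending a slice by one character: text[a:k+1] = text[a:k] ++ [text[k]].
lemma slice_snoc (t : List Char) (a k : Nat) (c : Char) (hak : a ≤ k)
    (hk : t.drop k = c :: (t.drop (k + 1))) :
    PySem.List.slice t (some ((a : Int))) (some ((k : Int) + 1))
      = PySem.List.slice t (some ((a : Int))) (some ((k : Int))) ++ [c] := by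
  have h1 : ((k : Int) + 1) = (((k + 1 : Nat)) : Int) := by push_cast; ring
  rw [h1, PySem.List.slice_natCast, PySem.List.slice_natCast]
  have h2 : k + 1 - a = (k - a) + 1 := by omega
  have h3 : t[k]? = some c := by
    have h : (List.drop k t)[0]? = t[k + 0]? := List.getElem?_drop
    rw [hk] at h
    simpa using h.symm
  rw [h2, List.take_add_one, List.getElem?_drop]
  have h4 : a + (k - a) = k := by omega
  rw [h4, h3]
  rfl

-- When k is past the end, text[a:] = text[a:k].
lemma slice_none_of_ge (t : List Char) (a k : Nat) (hk : t.length ≤ k) :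
    PySem.List.slice t (some ((a : Int))) none
      = PySem.List.slice t (some ((a : Int))) (some ((k : Int))) := by
  rw [PySem.List.slice_from_natCast, PySem.List.slice_natCast]
  rw [List.take_of_length_le]
  simp
  omega

-- Both loops' count/depth updates agree on a non-top-level-comma character.
lemma depth_eq (c : Char) (d : Int) :
    (if c = ')' then (if c = '(' then d + 1 else d) - 1 else (if c = '(' then d + 1 else d))
      = (if c = '(' then d + 1 else if c = ')' then d - 1 else d) := by
  split_ifs with h1 h2 <;> simp_all

-- Main invariant: A's state (count, start, ret) over the suffix starting at k corresponds to
-- B's state (ret, buffer = text[start+1:k], count).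
lemma split_comma_inv (t : List Char) :
    ∀ (cs : List Char) (k : Nat) (s d : Int) (acc : List String),
      t.drop k = cs → 0 ≤ s + 1 → s + 1 ≤ (k : Int) →
      (let st := (PySem.List.enumerate cs (k : Int)).foldl (splitCommaStepA t) (d, s, acc)
       st.2.2 ++ [String.ofList (PySem.List.slice t (some (st.2.1 + 1)) none)])
      = (let st := cs.foldl splitCommaStepB
            (acc, String.ofList (PySem.List.slice t (some (s + 1)) (some (k : Int))), d)
         st.1 ++ [st.2.1]) := by
  intro cs
  induction cs with
  | nil =>
    intro k s d acc hcs h0 hsk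
    obtain ⟨a, ha⟩ : ∃ a : Nat, (a : Int) = s + 1 := ⟨(s + 1).toNat, Int.toNat_of_nonneg h0⟩
    have hlen : t.length ≤ k := List.drop_eq_nil_iff.mp hcs
    simp only [PySem.List.enumerate_nil, List.foldl_nil]
    rw [← ha, slice_none_of_ge t a k hlen]
  | cons c cs ih =>
    intro k s d acc hcs h0 hsk
    have hdrop : t.drop (k + 1) = cs := by
      have h := congrArg List.tail hcs
      simpa [← List.tail_drop] using h
    have hk' : t.drop k = c :: t.drop (k + 1) := by rw [hdrop]; exact hcs
    rw [PySem.List.enumerate_cons]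
    simp only [List.foldl_cons]
    by_cases hc : c = ',' ∧ d = 0
    · obtain ⟨hc1, hc2⟩ := hc
      subst hc1
      subst hc2
      have hA : splitCommaStepA t (0, s, acc) ((k : Int), ',')
          = (0, (k : Int), acc ++ [String.ofList (PySem.List.slice t (some (s + 1)) (some ((k : Int))))]) := by
        simp [splitCommaStepA]
      have hB : splitCommaStepB (acc, String.ofList (PySem.List.slice t (some (s + 1)) (some ((k : Int)))), 0) ','
          = (acc ++ [String.ofList (PySem.List.slice t (some (s + 1)) (some ((k : Int))))], "", 0) := by
        simp [splitCommaStepB]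
      rw [hA, hB]
      have h := ih (k + 1) (k : Int) 0
        (acc ++ [String.ofList (PySem.List.slice t (some (s + 1)) (some ((k : Int))))])
        hdrop (by omega) (by push_cast; omega)
      push_cast at h
      have hempty : String.ofList (PySem.List.slice t (some ((k : Int) + 1)) (some ((k : Int) + 1))) = "" := by
        have hcast : ((k : Int) + 1) = (((k + 1 : Nat)) : Int) := by push_cast; ring
        rw [hcast, PySem.List.slice_natCast]
        simp
      rw [hempty] at h
      exact h
    · have hA : splitCommaStepA t (d, s, acc) ((k : Int), c)
          = ((if c = ')' then (if c = '(' then d + 1 else d) - 1 else (if c = '(' then d + 1 else d)), s, acc) := by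
        simp only [splitCommaStepA, if_neg hc]
      have hB : splitCommaStepB (acc, String.ofList (PySem.List.slice t (some (s + 1)) (some ((k : Int)))), d) c
          = (acc, (String.ofList (PySem.List.slice t (some (s + 1)) (some ((k : Int))))).push c,
             (if c = '(' then d + 1 else if c = ')' then d - 1 else d)) := by
        simp only [splitCommaStepB, if_neg hc]
      rw [hA, hB, depth_eq]
      obtain ⟨a, ha⟩ : ∃ a : Nat, (a : Int) = s + 1 := ⟨(s + 1).toNat, Int.toNat_of_nonneg h0⟩
      have hak : a ≤ k := by omega
      have hpush : (String.ofList (PySem.List.slice t (some (s + 1)) (some ((k : Int))))).push c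
          = String.ofList (PySem.List.slice t (some (s + 1)) (some ((k : Int) + 1))) := by
        rw [← ha, slice_snoc t a k c hak hk']
        simp [String.ext_iff]
      rw [hpush]
      have h := ih (k + 1) s (if c = '(' then d + 1 else if c = ')' then d - 1 else d) acc
        hdrop h0 (by push_cast; omega)
      push_cast at h
      exact h

-- ===== VERDICT (by name: the statement is the Claim_ definition above) =====
theorem split_comma_spec : Claim_equal_split_comma := by
  intro text _
  unfold Spec_split_comma split_comma split_comma_alt
  have h := split_comma_inv text.toList text.toList 0 (-1) 0 [] rfl (by omega) (by omega)
  have hempty : String.ofList (PySem.List.slice text.toList (some ((-1 : Int) + 1)) (some ((0 : Nat) : Int))) = "" := by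
    rw [show ((-1 : Int) + 1) = (((0 : Nat)) : Int) from by norm_num, PySem.List.slice_natCast]
    simp
  rw [hempty] at h
  simpa using h
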